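-- pv_equiv track=rewrite | github.com/acutantLabs/BSClassifier | backend/server.py | detect_amount_columns
-- ===== SOURCE A (Python) =====
-- from typing import List, Dict, Optional, Any, Union, Tuple
-- from typing import List, Dict, Optional, Any, Union
--
-- def detect_amount_columns(headers: List[str]) -> List[str]:
--     """Detect potential amount columns"""
--     # Priority keywords - columns containing these will be prioritized
--     priority_keywords = [
--         'transaction amount',
--         'transactionamount',
--         'txn amount',
--         'txnamount',
--         'amount',
--         'amt'
--     ]
--
--     # Secondary keywords - checked after priority keywords
--     secondary_keywords = ['value', 'debit', 'credit', 'dr', 'cr', 'balance', 'bal']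
--
--     priority_matches = []
--     secondary_matches = []
--     date_matches = []  # Columns containing 'date' - lowest priority
--
--     for h in headers:
--         h_lower = h.lower()
--
--         # Skip columns that contain 'date' - they should be deprioritized
--         if 'date' in h_lower:
--             # Still check if they match amount keywords, but put them in lowest priority
--             if any(keyword in h_lower for keyword in priority_keywords + secondary_keywords):
--                 date_matches.append(h)
--             continue
--
--         # Check priority keywords first
--         for keyword in priority_keywords:
--             if keyword in h_lower:
--                 priority_matches.append(h)
--                 break
--         else:
--             # Only check secondary keywords if no priority match found
--             if any(keyword in h_lower for keyword in secondary_keywords):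
--                 secondary_matches.append(h)
--
--     # Return priority matches first, then secondary matches, then date matches last
--     return priority_matches + secondary_matches + date_matches
-- ===== SOURCE B (Python) =====
-- def detect_amount_columns(headers):
--     """Detect potential amount columns (rank-and-stable-sort formulation)."""
--     priority_keywords = [
--         'transaction amount',
--         'transactionamount',
--         'txn amount',
--         'txnamount',
--         'amount',
--         'amt'
--     ]
--     secondary_keywords = ['value', 'debit', 'credit', 'dr', 'cr', 'balance', 'bal']
--
--     def rank(h):
--         hl = h.lower()
--         if 'date' in hl:
--             return 2 if any(k in hl for k in priority_keywords + secondary_keywords) else None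
--         if any(k in hl for k in priority_keywords):
--             return 0
--         if any(k in hl for k in secondary_keywords):
--             return 1
--         return None
--
--     kept = [h for h in headers if rank(h) is not None]
--     return sorted(kept, key=rank)
-- ===== Notes on version B (the rewrite author's own statement) =====
-- stated objective: alternative
-- what changed: Replaces A's single pass maintaining three accumulator lists (with a for/else keyword loop) by a rank helper that maps each header to 0/1/2 or skip, followed by a stable sort on the rank; bucket order and within-bucket order fall out of sort stability instead of explicit list concatenation.
import Mathlib
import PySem

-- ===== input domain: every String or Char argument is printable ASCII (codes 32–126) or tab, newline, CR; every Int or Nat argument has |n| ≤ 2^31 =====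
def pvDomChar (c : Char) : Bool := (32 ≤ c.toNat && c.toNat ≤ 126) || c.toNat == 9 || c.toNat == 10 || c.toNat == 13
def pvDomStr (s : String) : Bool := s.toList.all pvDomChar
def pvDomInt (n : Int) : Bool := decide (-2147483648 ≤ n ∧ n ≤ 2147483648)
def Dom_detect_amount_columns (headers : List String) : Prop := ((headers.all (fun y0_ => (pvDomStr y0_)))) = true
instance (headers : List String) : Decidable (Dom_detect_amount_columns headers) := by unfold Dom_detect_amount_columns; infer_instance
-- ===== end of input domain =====

-- B replaces A's one-pass three-accumulator classification by a rank helper plus a stable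
-- sort on the rank (objective: alternative decomposition, not faster).

-- Keyword lists (identical literals in both Pythons)
def priorityKeywords : List String :=
  ["transaction amount", "transactionamount", "txn amount", "txnamount", "amount", "amt"]
def secondaryKeywords : List String :=
  ["value", "debit", "credit", "dr", "cr", "balance", "bal"]

-- ===== PORT A =====
-- One pass; the inner 'for keyword … break / else' is ported as List.any over the keyword list.
def detect_amount_columns (headers : List String) : List String :=
  let step := fun (st : List String × List String × List String) (h : String) =>
    let hLower := PySem.Str.lower h
    if PySem.Str.isIn "date" hLower then
      if (priorityKeywords ++ secondaryKeywords).any (fun k => PySem.Str.isIn k hLower) then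
        (st.1, st.2.1, st.2.2 ++ [h])
      else st
    else if priorityKeywords.any (fun k => PySem.Str.isIn k hLower) then
      (st.1 ++ [h], st.2.1, st.2.2)
    else if secondaryKeywords.any (fun k => PySem.Str.isIn k hLower) then
      (st.1, st.2.1 ++ [h], st.2.2)
    else st
  let st := headers.foldl step ([], [], [])
  st.1 ++ st.2.1 ++ st.2.2

-- ===== PORT B =====
-- rank(h): some 0 priority, some 1 secondary, some 2 date-with-keyword, none = skipped
def rankB (h : String) : Option Int :=
  let hLower := PySem.Str.lower h
  if PySem.Str.isIn "date" hLower then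
    if (priorityKeywords ++ secondaryKeywords).any (fun k => PySem.Str.isIn k hLower) then
      some 2
    else none
  else if priorityKeywords.any (fun k => PySem.Str.isIn k hLower) then some 0
  else if secondaryKeywords.any (fun k => PySem.Str.isIn k hLower) then some 1
  else none

def detect_amount_columns_alt (headers : List String) : List String :=
  let kept := headers.filter (fun h => (rankB h).isSome)
  PySem.List.sorted kept (fun h => (rankB h).getD 0) false

-- ===== PRECONDITION & SPEC =====
def Spec_detect_amount_columns (headers : List String) (out : List String) : Prop := out = detect_amount_columns_alt headers
instance (headers : List String) (out : List String) : Decidable (Spec_detect_amount_columns headers out) := by unfold Spec_detect_amount_columns; infer_instance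

-- ===== CLAIM (what is proved, stated in full; the proofs are below) =====
def Claim_equal_detect_amount_columns : Prop := ∀ (headers : List String), Dom_detect_amount_columns headers → Spec_detect_amount_columns headers (detect_amount_columns headers)

-- ===== LEMMAS AND PROOFS =====

-- predicates for the three buckets of A
def pDate (h : String) : Bool :=
  PySem.Str.isIn "date" (PySem.Str.lower h) &&
    (priorityKeywords ++ secondaryKeywords).any (fun k => PySem.Str.isIn k (PySem.Str.lower h))
def pPrio (h : String) : Bool :=
  !PySem.Str.isIn "date" (PySem.Str.lower h) &&
    priorityKeywords.any (fun k => PySem.Str.isIn k (PySem.Str.lower h))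
def pSec (h : String) : Bool :=
  !PySem.Str.isIn "date" (PySem.Str.lower h) &&
    !priorityKeywords.any (fun k => PySem.Str.isIn k (PySem.Str.lower h)) &&
    secondaryKeywords.any (fun k => PySem.Str.isIn k (PySem.Str.lower h))

lemma detect_foldl_eq (headers : List String) (a b c : List String) :
    headers.foldl (fun (st : List String × List String × List String) (h : String) =>
      let hLower := PySem.Str.lower h
      if PySem.Str.isIn "date" hLower then
        if (priorityKeywords ++ secondaryKeywords).any (fun k => PySem.Str.isIn k hLower) then
          (st.1, st.2.1, st.2.2 ++ [h])
        else st
      else if priorityKeywords.any (fun k => PySem.Str.isIn k hLower) then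
        (st.1 ++ [h], st.2.1, st.2.2)
      else if secondaryKeywords.any (fun k => PySem.Str.isIn k hLower) then
        (st.1, st.2.1 ++ [h], st.2.2)
      else st) (a, b, c)
    = (a ++ headers.filter pPrio, b ++ headers.filter pSec, c ++ headers.filter pDate) := by
  induction headers generalizing a b c with
  | nil => simp
  | cons h t ih =>
    by_cases hd : PySem.Str.isIn "date" (PySem.Str.lower h) = true
    · by_cases hk : ((priorityKeywords ++ secondaryKeywords).any
          (fun k => PySem.Str.isIn k (PySem.Str.lower h))) = true
      · have e0 : pPrio h = false := by
          simp only [pPrio, hd, Bool.not_true, Bool.false_and]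
        have e1 : pSec h = false := by
          simp only [pSec, hd, Bool.not_true, Bool.false_and]
        have e2 : pDate h = true := by
          simp only [pDate, hd, hk, Bool.and_self]
        simp only [List.foldl_cons, List.filter_cons, hd, hk, e0, e1, e2, if_true,
          Bool.false_eq_true, if_false]
        rw [ih]
        simp
      · rw [Bool.not_eq_true] at hk
        have e0 : pPrio h = false := by
          simp only [pPrio, hd, Bool.not_true, Bool.false_and]
        have e1 : pSec h = false := by
          simp only [pSec, hd, Bool.not_true, Bool.false_and]
        have e2 : pDate h = false := by
          simp only [pDate, hd, hk, Bool.and_false]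
        simp only [List.foldl_cons, List.filter_cons, hd, hk, e0, e1, e2, if_true,
          Bool.false_eq_true, if_false]
        exact ih a b c
    · rw [Bool.not_eq_true] at hd
      by_cases hp : (priorityKeywords.any (fun k => PySem.Str.isIn k (PySem.Str.lower h))) = true
      · have e0 : pPrio h = true := by
          simp only [pPrio, hd, hp, Bool.not_false, Bool.true_and]
        have e1 : pSec h = false := by
          simp only [pSec, hp, Bool.not_true, Bool.false_and, Bool.and_false]
        have e2 : pDate h = false := by
          simp only [pDate, hd, Bool.false_and]
        simp only [List.foldl_cons, List.filter_cons, hd, hp, e0, e1, e2, if_true,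
          Bool.false_eq_true, if_false]
        rw [ih]
        simp
      · rw [Bool.not_eq_true] at hp
        by_cases hs : (secondaryKeywords.any (fun k => PySem.Str.isIn k (PySem.Str.lower h))) = true
        · have e0 : pPrio h = false := by
            simp only [pPrio, hp, Bool.and_false]
          have e1 : pSec h = true := by
            simp only [pSec, hd, hp, hs, Bool.not_false, Bool.true_and]
          have e2 : pDate h = false := by
            simp only [pDate, hd, Bool.false_and]
          simp only [List.foldl_cons, List.filter_cons, hd, hp, hs, e0, e1, e2, if_true,
            Bool.false_eq_true, if_false]
          rw [ih]
          simp
        · rw [Bool.not_eq_true] at hs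
          have e0 : pPrio h = false := by
            simp only [pPrio, hp, Bool.and_false]
          have e1 : pSec h = false := by
            simp only [pSec, hs, Bool.and_false]
          have e2 : pDate h = false := by
            simp only [pDate, hd, Bool.false_and]
          simp only [List.foldl_cons, List.filter_cons, hd, hp, hs, e0, e1, e2,
            Bool.false_eq_true, if_false]
          exact ih a b c

lemma detect_A_eq (headers : List String) :
    detect_amount_columns headers
      = headers.filter pPrio ++ headers.filter pSec ++ headers.filter pDate := by
  simp only [detect_amount_columns]
  rw [detect_foldl_eq]
  simp only [List.nil_append, List.append_assoc]

-- insertBy passes over a prefix none of whose elements trigger `before`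
lemma insertBy_append_of_not {α : Type} (before : α → α → Bool) (x : α) (L M : List α)
    (hL : ∀ y ∈ L, before x y = false) :
    PySem.List.insertBy before x (L ++ M) = L ++ PySem.List.insertBy before x M := by
  induction L with
  | nil => rfl
  | cons y ys ih =>
    have hy : before x y = false := hL y (by simp)
    simp only [List.cons_append, PySem.List.insertBy, hy]
    simp only [Bool.false_eq_true, if_false]
    exact congrArg (y :: ·) (ih (fun z hz => hL z (by simp [hz])))

lemma insertBy_cons_of_head {α : Type} (before : α → α → Bool) (x : α) (M : List α)
    (hM : ∀ y, y ∈ M.head? → before x y = true) :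
    PySem.List.insertBy before x M = x :: M := by
  cases M with
  | nil => rfl
  | cons y ys =>
    have : before x y = true := hM y rfl
    simp [PySem.List.insertBy, this]

-- stable sort by a key in {0,1,2} is the concatenation of the three filters
lemma sorted_three_buckets {α : Type} (key : α → Int) (xs : List α)
    (hk : ∀ x ∈ xs, key x = 0 ∨ key x = 1 ∨ key x = 2) :
    PySem.List.sorted xs key false
      = xs.filter (fun x => key x == 0) ++ xs.filter (fun x => key x == 1)
          ++ xs.filter (fun x => key x == 2) := by
  rw [PySem.List.sorted_eq_foldl_insertBy]
  suffices H : ∀ (ys : List α), (∀ x ∈ ys, key x = 0 ∨ key x = 1 ∨ key x = 2) →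
      ∀ (A B C : List α), (∀ a ∈ A, key a = 0) → (∀ b ∈ B, key b = 1) → (∀ c ∈ C, key c = 2) →
      ys.foldl (fun acc x => PySem.List.insertBy (fun a b => decide (key a < key b)) x acc)
          (A ++ B ++ C)
        = (A ++ ys.filter (fun x => key x == 0)) ++ (B ++ ys.filter (fun x => key x == 1))
            ++ (C ++ ys.filter (fun x => key x == 2)) by
    have := H xs hk [] [] [] (by simp) (by simp) (by simp)
    simpa using this
  intro ys
  induction ys with
  | nil => intro _ A B C _ _ _; simp
  | cons x t ih =>
    intro hmem A B C hA hB hC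
    have hx := hmem x (by simp)
    have hmt : ∀ y ∈ t, key y = 0 ∨ key y = 1 ∨ key y = 2 :=
      fun y hy => hmem y (by simp [hy])
    simp only [List.foldl_cons, List.filter_cons]
    rcases hx with h0 | h1 | h2
    · -- key x = 0: x goes right after A
      have step : PySem.List.insertBy (fun a b => decide (key a < key b)) x (A ++ B ++ C)
          = (A ++ [x]) ++ B ++ C := by
        rw [List.append_assoc,
          insertBy_append_of_not _ _ A (B ++ C) (fun y hy => by simp [h0, hA y hy]),
          insertBy_cons_of_head _ _ (B ++ C) (fun y hy => by
            rcases List.mem_append.mp (List.mem_of_mem_head? hy) with hb | hc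
            · simp [h0, hB y hb]
            · simp [h0, hC y hc])]
        simp
      rw [step, ih hmt (A ++ [x]) B C
        (fun a ha => by
          rcases List.mem_append.mp ha with h | h
          · exact hA a h
          · simp at h; simpa [h] using h0) hB hC]
      simp [h0]
    · -- key x = 1: x goes right after B
      have step : PySem.List.insertBy (fun a b => decide (key a < key b)) x (A ++ B ++ C)
          = A ++ (B ++ [x]) ++ C := by
        rw [List.append_assoc,
          insertBy_append_of_not _ _ A (B ++ C) (fun y hy => by simp [h1, hA y hy]),
          insertBy_append_of_not _ _ B C (fun y hy => by simp [h1, hB y hy]),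
          insertBy_cons_of_head _ _ C (fun y hy => by
            simp [h1, hC y (List.mem_of_mem_head? hy)])]
        simp
      rw [step, ih hmt A (B ++ [x]) C hA
        (fun b hb => by
          rcases List.mem_append.mp hb with h | h
          · exact hB b h
          · simp at h; simpa [h] using h1) hC]
      simp [h1]
    · -- key x = 2: x goes to the very end
      have step : PySem.List.insertBy (fun a b => decide (key a < key b)) x (A ++ B ++ C)
          = A ++ B ++ (C ++ [x]) := by
        rw [PySem.List.insertBy_of_forall_not_before _ _ _ (fun y hy => by
          rcases List.mem_append.mp hy with hab | hc
          · rcases List.mem_append.mp hab with ha | hb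
            · simp [h2, hA y ha]
            · simp [h2, hB y hb]
          · simp [h2, hC y hc])]
        simp
      rw [step, ih hmt A B (C ++ [x]) hA hB
        (fun c hc => by
          rcases List.mem_append.mp hc with h | h
          · exact hC c h
          · simp at h; simpa [h] using h2)]
      simp [h2]

lemma rankB_cases (h : String) :
    rankB h = none ∨ rankB h = some 0 ∨ rankB h = some 1 ∨ rankB h = some 2 := by
  simp only [rankB]
  split_ifs <;> simp

lemma rank_eq_pPrio (x : String) :
    (((rankB x).getD 0 == 0) && (rankB x).isSome) = pPrio x := by
  simp only [rankB, pPrio]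
  split_ifs <;> simp_all

lemma rank_eq_pSec (x : String) :
    (((rankB x).getD 0 == 1) && (rankB x).isSome) = pSec x := by
  simp only [rankB, pSec]
  split_ifs <;> simp_all

lemma rank_eq_pDate (x : String) :
    (((rankB x).getD 0 == 2) && (rankB x).isSome) = pDate x := by
  simp only [rankB, pDate]
  split_ifs <;> simp_all

-- ===== VERDICT (by name: the statement is the Claim_ definition above) =====
theorem detect_amount_columns_spec : Claim_equal_detect_amount_columns := by
  intro headers _
  show detect_amount_columns headers = detect_amount_columns_alt headers
  rw [detect_A_eq]
  simp only [detect_amount_columns_alt]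
  rw [sorted_three_buckets (fun h => (rankB h).getD 0)
    (headers.filter (fun h => (rankB h).isSome))
    (by
      intro x hx
      have hs : (rankB x).isSome = true := by
        have := (List.mem_filter.mp hx).2
        simpa using this
      rcases rankB_cases x with h | h | h | h <;> simp [h] at hs ⊢)]
  rw [List.filter_filter, List.filter_filter, List.filter_filter,
    List.filter_congr (fun x _ => rank_eq_pPrio x),
    List.filter_congr (fun x _ => rank_eq_pSec x),
    List.filter_congr (fun x _ => rank_eq_pDate x)]
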